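-- pv_equiv track=rewrite | github.com/gm24med/gcp_refac | src/core/processors.py | normalize_darija
-- ===== SOURCE A (Python) =====
-- def normalize_darija(text: str) -> str:
--     """Normalize Darija-specific patterns"""
--     # Common Darija normalizations
--     replacements = {
--         'wach': 'واش',
--         'kayn': 'كاين',
--         'chi': 'شي',
--         'dial': 'ديال'
--     }
--
--     for latin, arabic in replacements.items():
--         text = text.replace(latin, arabic)
--
--     return text
-- ===== SOURCE B (Python) =====
-- def normalize_darija(text: str) -> str:
--     """Normalize Darija-specific patterns in one left-to-right pass."""
--     replacements = {
--         'wach': 'واش',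
--         'kayn': 'كاين',
--         'chi': 'شي',
--         'dial': 'ديال'
--     }
--     out = []
--     i = 0
--     n = len(text)
--     while i < n:
--         for latin, arabic in replacements.items():
--             if text.startswith(latin, i):
--                 out.append(arabic)
--                 i += len(latin)
--                 break
--         else:
--             out.append(text[i])
--             i += 1
--     return ''.join(out)
-- ===== Notes on version B (the rewrite author's own statement) =====
-- stated objective: alternative
-- what changed: Replaced four sequential full-text str.replace passes (one per dictionary entry) by a single left-to-right scan that at each position tries the four tokens and emits the first match or the current character.
import Mathlib
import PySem

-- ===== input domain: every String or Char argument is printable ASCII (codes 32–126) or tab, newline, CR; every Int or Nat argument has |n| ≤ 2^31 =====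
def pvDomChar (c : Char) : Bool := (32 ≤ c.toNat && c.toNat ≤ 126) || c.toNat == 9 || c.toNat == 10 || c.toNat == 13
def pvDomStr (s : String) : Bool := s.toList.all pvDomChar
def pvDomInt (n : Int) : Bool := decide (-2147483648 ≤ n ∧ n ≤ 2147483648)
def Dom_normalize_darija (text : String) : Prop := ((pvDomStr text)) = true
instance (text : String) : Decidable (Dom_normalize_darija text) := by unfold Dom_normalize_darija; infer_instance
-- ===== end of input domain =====

-- B replaces A's four sequential full-text replace passes with one left-to-right scan (alternative decomposition, same result).

-- ===== PORT A =====
def normalize_darija (text : String) : String :=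
  -- the dict of replacements, in insertion order
  let replacements : PySem.Dict String String :=
    ((((PySem.Dict.empty).insert "wach" "واش").insert "kayn" "كاين").insert "chi" "شي").insert "dial" "ديال"
  -- for latin, arabic in replacements.items(): text = text.replace(latin, arabic)
  replacements.items.foldl (fun t p => PySem.Str.replace t p.1 p.2) text

-- ===== PORT B =====
-- single pass over the characters: at each position try the four tokens in dict order,
-- emit the first matching replacement (advancing past the token), else the character itself
def normAltScan (l : List Char) : List Char :=
  match l with
  | [] => []
  | c :: t =>
    if "wach".toList.isPrefixOf (c :: t) then "واش".toList ++ normAltScan (t.drop 3)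
    else if "kayn".toList.isPrefixOf (c :: t) then "كاين".toList ++ normAltScan (t.drop 3)
    else if "chi".toList.isPrefixOf (c :: t) then "شي".toList ++ normAltScan (t.drop 2)
    else if "dial".toList.isPrefixOf (c :: t) then "ديال".toList ++ normAltScan (t.drop 3)
    else c :: normAltScan t
termination_by l.length
decreasing_by all_goals simp [List.length_drop]

def normalize_darija_alt (text : String) : String :=
  String.ofList (normAltScan text.toList)

-- ===== PRECONDITION & SPEC =====
def Spec_normalize_darija (text : String) (out : String) : Prop := out = normalize_darija_alt text
instance (text : String) (out : String) : Decidable (Spec_normalize_darija text out) := by unfold Spec_normalize_darija; infer_instance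

-- ===== CLAIM (what is proved, stated in full; the proofs are below) =====
def Claim_equal_normalize_darija : Prop := ∀ (text : String), Dom_normalize_darija text → Spec_normalize_darija text (normalize_darija text)

-- ===== LEMMAS AND PROOFS =====

-- structural characterisation of one Python str.replace pass
def repOne (old new : List Char) (l : List Char) : List Char :=
  match l with
  | [] => []
  | c :: t =>
    if old.isPrefixOf (c :: t) then new ++ repOne old new (t.drop (old.length - 1))
    else c :: repOne old new t
termination_by l.length
decreasing_by all_goals simp [List.length_drop]

theorem repOne_nil (old new : List Char) : repOne old new [] = [] := by rw [repOne]

theorem repOne_go_spec (old new : List Char) (hold : old ≠ []) :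
    ∀ (fuel : Nat) (l acc : List Char), l.length ≤ fuel →
      PySem.Chars.replace.go old new fuel l acc = acc.reverse ++ repOne old new l := by
  intro fuel
  induction fuel with
  | zero =>
    intro l acc hl
    have : l = [] := by cases l <;> simp_all
    subst this
    simp [PySem.Chars.replace.go, repOne]
  | succ n ih =>
    intro l acc hl
    cases l with
    | nil => simp [PySem.Chars.replace.go, repOne]
    | cons c t =>
      rw [PySem.Chars.replace.go]
      rw [repOne]
      by_cases h : old.isPrefixOf (c :: t)
      · simp only [h, if_true]
        obtain ⟨o, os, rfl⟩ : ∃ o os, old = o :: os := by cases old <;> simp_all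
        have hlen : (t.drop ((o :: os).length - 1)).length ≤ n := by
          simp only [List.length_drop, List.length_cons]
          simp only [List.length_cons] at hl
          omega
        simp only [List.length_cons, Nat.add_sub_cancel] at hlen ⊢
        rw [List.drop_succ_cons, ih _ _ hlen]
        simp
      · simp only [h]
        have hlen : t.length ≤ n := by simp only [List.length_cons] at hl; omega
        rw [ih _ _ hlen]
        simp

theorem replace_eq_repOne (old new s : List Char) (hold : old ≠ []) :
    PySem.Chars.replace s old new = repOne old new s := by
  rw [PySem.Chars.replace]
  have : old.isEmpty = false := by cases old <;> simp_all
  rw [this]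
  simp only [Bool.false_eq_true, if_false]
  rw [repOne_go_spec old new hold s.length s [] le_rfl]
  simp

-- passing a segment that cannot start a match through a replace pass
theorem repOne_append_notin (o : Char) (os new : List Char) (p X : List Char)
    (hp : o ∉ p) : repOne (o :: os) new (p ++ X) = p ++ repOne (o :: os) new X := by
  induction p with
  | nil => simp
  | cons a p ih =>
    simp only [List.mem_cons, not_or] at hp
    rw [List.cons_append, repOne]
    have : (o :: os).isPrefixOf (a :: (p ++ X)) = false := by
      simp only [List.isPrefixOf, Bool.and_eq_false_iff]
      left
      simpa using hp.1
    rw [this]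
    simp only [Bool.false_eq_true, if_false]
    rw [ih hp.2]; simp

-- a prefix made of characters not occurring in `new` is reflected back to the input
theorem repOne_reflect_prefix (old : List Char) (n0 : Char) (ns : List Char) :
    ∀ t p, (∀ c ∈ p, c ∉ n0 :: ns) → p <+: repOne old (n0 :: ns) t → p <+: t := by
  intro t
  induction t using repOne.induct old with
  | case1 => intro p hp h; simpa [repOne] using h
  | case2 c t hpre ih =>
    intro p hp h
    rw [repOne, if_pos hpre] at h
    cases p with
    | nil => simp
    | cons a q =>
      exfalso
      rw [List.cons_append] at h
      exact hp a (by simp) (by simp [(List.cons_prefix_cons.mp h).1])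
  | case3 c t hpre ih =>
    intro p hp h
    rw [repOne, if_neg hpre] at h
    cases p with
    | nil => simp
    | cons a q =>
      obtain ⟨rfl, hq⟩ := List.cons_prefix_cons.mp h
      exact List.cons_prefix_cons.mpr ⟨rfl, ih q (fun c hc => hp c (List.mem_cons_of_mem _ hc)) hq⟩

theorem scan_nil : normAltScan [] = [] := by rw [normAltScan]

theorem scan_eq (c : Char) (t : List Char) : normAltScan (c::t) =
    (if ('w'::['a','c','h'] : List Char).isPrefixOf (c :: t) then "واش".toList ++ normAltScan (t.drop 3)
    else if ('k'::['a','y','n'] : List Char).isPrefixOf (c :: t) then "كاين".toList ++ normAltScan (t.drop 3)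
    else if ('c'::['h','i'] : List Char).isPrefixOf (c :: t) then "شي".toList ++ normAltScan (t.drop 2)
    else if ('d'::['i','a','l'] : List Char).isPrefixOf (c :: t) then "ديال".toList ++ normAltScan (t.drop 3)
    else c :: normAltScan t) := by
  rw [normAltScan]
  rfl

set_option maxRecDepth 4096 in
theorem comp_eq_scan : ∀ (l : List Char),
    repOne "dial".toList "ديال".toList
      (repOne "chi".toList "شي".toList
        (repOne "kayn".toList "كاين".toList
          (repOne "wach".toList "واش".toList l))) = normAltScan l := by
  have key : ∀ (n : Nat) (l : List Char), l.length ≤ n →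
      repOne ('d'::['i','a','l']) "ديال".toList
        (repOne ('c'::['h','i']) "شي".toList
          (repOne ('k'::['a','y','n']) "كاين".toList
            (repOne ('w'::['a','c','h']) "واش".toList l))) = normAltScan l := by
    intro n
    induction n with
    | zero =>
      intro l hl
      have : l = [] := by cases l <;> simp_all
      subst this
      simp [repOne_nil, scan_nil]
    | succ n ih =>
      intro l hl
      cases l with
      | nil => simp [repOne_nil, scan_nil]
      | cons c t =>
        have ht : t.length ≤ n := by simp only [List.length_cons] at hl; omega
        by_cases h1 : ('w'::['a','c','h'] : List Char).isPrefixOf (c :: t) = true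
        · -- 'wach' matches at the current position
          have e1 : repOne ('w'::['a','c','h']) "واش".toList (c :: t)
              = "واش".toList ++ repOne ('w'::['a','c','h']) "واش".toList (t.drop 3) := by
            rw [repOne, if_pos h1]; rfl
          rw [e1,
              repOne_append_notin 'k' ['a','y','n'] "كاين".toList "واش".toList _ (by decide),
              repOne_append_notin 'c' ['h','i'] "شي".toList "واش".toList _ (by decide),
              repOne_append_notin 'd' ['i','a','l'] "ديال".toList "واش".toList _ (by decide),
              scan_eq, if_pos h1,
              ih (t.drop 3) (by simp only [List.length_drop]; omega)]
        · by_cases h2 : ('k'::['a','y','n'] : List Char).isPrefixOf (c :: t) = true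
          · -- 'kayn' matches at the current position
            obtain ⟨u, hu⟩ := List.isPrefixOf_iff_prefix.mp h2
            rw [List.cons_append] at hu
            injection hu with hc htl
            subst hc; subst htl
            have hul : u.length ≤ n := by
              simp only [List.length_cons, List.length_append] at hl ⊢; omega
            have e1 : repOne ('w'::['a','c','h']) "واش".toList ('k' :: (['a','y','n'] ++ u))
                = 'k' :: (['a','y','n'] ++ repOne ('w'::['a','c','h']) "واش".toList u) :=
              repOne_append_notin 'w' ['a','c','h'] "واش".toList ['k','a','y','n'] u (by decide)
            have e2 : ∀ X : List Char, repOne ('k'::['a','y','n']) "كاين".toList ('k' :: (['a','y','n'] ++ X))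
                = "كاين".toList ++ repOne ('k'::['a','y','n']) "كاين".toList X := by
              intro X
              rw [repOne, if_pos (by simp [List.isPrefixOf])]; rfl
            rw [e1, e2,
                repOne_append_notin 'c' ['h','i'] "شي".toList "كاين".toList _ (by decide),
                repOne_append_notin 'd' ['i','a','l'] "ديال".toList "كاين".toList _ (by decide),
                scan_eq, if_neg h1, if_pos h2,
                show List.drop 3 (['a','y','n'] ++ u) = u from rfl,
                ih u hul]
          · by_cases h3 : ('c'::['h','i'] : List Char).isPrefixOf (c :: t) = true
            · -- 'chi' matches at the current position
              obtain ⟨u, hu⟩ := List.isPrefixOf_iff_prefix.mp h3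
              rw [List.cons_append] at hu
              injection hu with hc htl
              subst hc; subst htl
              have hul : u.length ≤ n := by
                simp only [List.length_cons, List.length_append] at hl ⊢; omega
              have e1 : repOne ('w'::['a','c','h']) "واش".toList ('c' :: (['h','i'] ++ u))
                  = 'c' :: (['h','i'] ++ repOne ('w'::['a','c','h']) "واش".toList u) :=
                repOne_append_notin 'w' ['a','c','h'] "واش".toList ['c','h','i'] u (by decide)
              have e2 : repOne ('k'::['a','y','n']) "كاين".toList ('c' :: (['h','i'] ++ repOne ('w'::['a','c','h']) "واش".toList u))
                  = 'c' :: (['h','i'] ++ repOne ('k'::['a','y','n']) "كاين".toList (repOne ('w'::['a','c','h']) "واش".toList u)) :=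
                repOne_append_notin 'k' ['a','y','n'] "كاين".toList ['c','h','i'] _ (by decide)
              have e3 : ∀ X : List Char, repOne ('c'::['h','i']) "شي".toList ('c' :: (['h','i'] ++ X))
                  = "شي".toList ++ repOne ('c'::['h','i']) "شي".toList X := by
                intro X
                rw [repOne, if_pos (by simp [List.isPrefixOf])]; rfl
              rw [e1, e2, e3,
                  repOne_append_notin 'd' ['i','a','l'] "ديال".toList "شي".toList _ (by decide),
                  scan_eq, if_neg h1, if_neg h2, if_pos h3,
                  show List.drop 2 (['h','i'] ++ u) = u from rfl,
                  ih u hul]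
            · by_cases h4 : ('d'::['i','a','l'] : List Char).isPrefixOf (c :: t) = true
              · -- 'dial' matches at the current position
                obtain ⟨u, hu⟩ := List.isPrefixOf_iff_prefix.mp h4
                rw [List.cons_append] at hu
                injection hu with hc htl
                subst hc; subst htl
                have hul : u.length ≤ n := by
                  simp only [List.length_cons, List.length_append] at hl ⊢; omega
                have e1 : repOne ('w'::['a','c','h']) "واش".toList ('d' :: (['i','a','l'] ++ u))
                    = 'd' :: (['i','a','l'] ++ repOne ('w'::['a','c','h']) "واش".toList u) :=
                  repOne_append_notin 'w' ['a','c','h'] "واش".toList ['d','i','a','l'] u (by decide)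
                have e2 : repOne ('k'::['a','y','n']) "كاين".toList ('d' :: (['i','a','l'] ++ repOne ('w'::['a','c','h']) "واش".toList u))
                    = 'd' :: (['i','a','l'] ++ repOne ('k'::['a','y','n']) "كاين".toList (repOne ('w'::['a','c','h']) "واش".toList u)) :=
                  repOne_append_notin 'k' ['a','y','n'] "كاين".toList ['d','i','a','l'] _ (by decide)
                have e3 : repOne ('c'::['h','i']) "شي".toList ('d' :: (['i','a','l'] ++ repOne ('k'::['a','y','n']) "كاين".toList (repOne ('w'::['a','c','h']) "واش".toList u)))
                    = 'd' :: (['i','a','l'] ++ repOne ('c'::['h','i']) "شي".toList (repOne ('k'::['a','y','n']) "كاين".toList (repOne ('w'::['a','c','h']) "واش".toList u))) :=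
                  repOne_append_notin 'c' ['h','i'] "شي".toList ['d','i','a','l'] _ (by decide)
                have e4 : ∀ X : List Char, repOne ('d'::['i','a','l']) "ديال".toList ('d' :: (['i','a','l'] ++ X))
                    = "ديال".toList ++ repOne ('d'::['i','a','l']) "ديال".toList X := by
                  intro X
                  rw [repOne, if_pos (by simp [List.isPrefixOf])]; rfl
                rw [e1, e2, e3, e4,
                    scan_eq, if_neg h1, if_neg h2, if_neg h3, if_pos h4,
                    show List.drop 3 (['i','a','l'] ++ u) = u from rfl,
                    ih u hul]
              · -- no token matches at the current position
                have e1 : repOne ('w'::['a','c','h']) "واش".toList (c :: t)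
                    = c :: repOne ('w'::['a','c','h']) "واش".toList t := by
                  rw [repOne, if_neg h1]
                have nh2 : ¬ ('k'::['a','y','n'] : List Char).isPrefixOf
                    (c :: repOne ('w'::['a','c','h']) "واش".toList t) = true := by
                  intro h
                  obtain ⟨hc, hq⟩ := List.cons_prefix_cons.mp (List.isPrefixOf_iff_prefix.mp h)
                  have h' : (['a','y','n'] : List Char) <+: t :=
                    repOne_reflect_prefix ('w'::['a','c','h']) 'و' ['ا','ش'] t ['a','y','n'] (by simp) hq
                  exact h2 (List.isPrefixOf_iff_prefix.mpr (List.cons_prefix_cons.mpr ⟨hc, h'⟩))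
                have e2 : repOne ('k'::['a','y','n']) "كاين".toList (c :: repOne ('w'::['a','c','h']) "واش".toList t)
                    = c :: repOne ('k'::['a','y','n']) "كاين".toList (repOne ('w'::['a','c','h']) "واش".toList t) := by
                  rw [repOne, if_neg nh2]
                have nh3 : ¬ ('c'::['h','i'] : List Char).isPrefixOf
                    (c :: repOne ('k'::['a','y','n']) "كاين".toList (repOne ('w'::['a','c','h']) "واش".toList t)) = true := by
                  intro h
                  obtain ⟨hc, hq⟩ := List.cons_prefix_cons.mp (List.isPrefixOf_iff_prefix.mp h)
                  have h'1 : (['h','i'] : List Char) <+: repOne ('w'::['a','c','h']) "واش".toList t :=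
                    repOne_reflect_prefix ('k'::['a','y','n']) 'ك' ['ا','ي','ن'] _ ['h','i'] (by simp) hq
                  have h'2 : (['h','i'] : List Char) <+: t :=
                    repOne_reflect_prefix ('w'::['a','c','h']) 'و' ['ا','ش'] t ['h','i'] (by simp) h'1
                  exact h3 (List.isPrefixOf_iff_prefix.mpr (List.cons_prefix_cons.mpr ⟨hc, h'2⟩))
                have e3 : repOne ('c'::['h','i']) "شي".toList (c :: repOne ('k'::['a','y','n']) "كاين".toList (repOne ('w'::['a','c','h']) "واش".toList t))
                    = c :: repOne ('c'::['h','i']) "شي".toList (repOne ('k'::['a','y','n']) "كاين".toList (repOne ('w'::['a','c','h']) "واش".toList t)) := by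
                  rw [repOne, if_neg nh3]
                have nh4 : ¬ ('d'::['i','a','l'] : List Char).isPrefixOf
                    (c :: repOne ('c'::['h','i']) "شي".toList (repOne ('k'::['a','y','n']) "كاين".toList (repOne ('w'::['a','c','h']) "واش".toList t))) = true := by
                  intro h
                  obtain ⟨hc, hq⟩ := List.cons_prefix_cons.mp (List.isPrefixOf_iff_prefix.mp h)
                  have h'1 : (['i','a','l'] : List Char) <+: repOne ('k'::['a','y','n']) "كاين".toList (repOne ('w'::['a','c','h']) "واش".toList t) :=
                    repOne_reflect_prefix ('c'::['h','i']) 'ش' ['ي'] _ ['i','a','l'] (by simp) hq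
                  have h'2 : (['i','a','l'] : List Char) <+: repOne ('w'::['a','c','h']) "واش".toList t :=
                    repOne_reflect_prefix ('k'::['a','y','n']) 'ك' ['ا','ي','ن'] _ ['i','a','l'] (by simp) h'1
                  have h'3 : (['i','a','l'] : List Char) <+: t :=
                    repOne_reflect_prefix ('w'::['a','c','h']) 'و' ['ا','ش'] t ['i','a','l'] (by simp) h'2
                  exact h4 (List.isPrefixOf_iff_prefix.mpr (List.cons_prefix_cons.mpr ⟨hc, h'3⟩))
                have e4 : repOne ('d'::['i','a','l']) "ديال".toList (c :: repOne ('c'::['h','i']) "شي".toList (repOne ('k'::['a','y','n']) "كاين".toList (repOne ('w'::['a','c','h']) "واش".toList t)))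
                    = c :: repOne ('d'::['i','a','l']) "ديال".toList (repOne ('c'::['h','i']) "شي".toList (repOne ('k'::['a','y','n']) "كاين".toList (repOne ('w'::['a','c','h']) "واش".toList t))) := by
                  rw [repOne, if_neg nh4]
                rw [e1, e2, e3, e4,
                    scan_eq, if_neg h1, if_neg h2, if_neg h3, if_neg h4,
                    ih t ht]
  intro l
  exact key l.length l le_rfl

-- ===== VERDICT (by name: the statement is the Claim_ definition above) =====
theorem normalize_darija_spec : Claim_equal_normalize_darija := by
  intro text _
  unfold Spec_normalize_darija normalize_darija normalize_darija_alt
  have hitems : (((((PySem.Dict.empty).insert "wach" "واش").insert "kayn" "كاين").insert "chi" "شي").insert "dial" "ديال" : PySem.Dict String String).items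
      = [("wach", "واش"), ("kayn", "كاين"), ("chi", "شي"), ("dial", "ديال")] := by decide
  show List.foldl (fun t p => PySem.Str.replace t p.1 p.2) text
      ((((PySem.Dict.empty.insert "wach" "واش").insert "kayn" "كاين").insert "chi" "شي").insert "dial" "ديال" : PySem.Dict String String).items
    = String.ofList (normAltScan text.toList)
  rw [hitems]
  simp only [List.foldl]
  apply String.toList_injective
  simp only [PySem.Str.toList_replace, String.toList_ofList]
  rw [replace_eq_repOne _ _ _ (by decide), replace_eq_repOne _ _ _ (by decide),
      replace_eq_repOne _ _ _ (by decide), replace_eq_repOne _ _ _ (by decide)]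
  exact comp_eq_scan text.toList
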